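-- pv_equiv track=rewrite | github.com/Ferchaim/Projetos-Python-MAC2166 | EP2/EP 2 (Final).py | listaCanonicaDeRaizes
-- ===== SOURCE A (Python) =====
-- def polinomioComRaiz(p,b):
--     """Devolve True se b é raiz do polinômio representado pela lista p,
--        ou False no caso contrário.
--
--        p -- a lista dos coeficientes do polinômio
--        b -- o número a ser testado como raiz
--     """
--
--     # Escreva aqui o corpo da função
--     #Este código foi feito baseado no Algorítimo (Teorema) de Briot-Ruffini
--     m = []
--     o = p + []
--     o.reverse()
--     m.append(o[0])
--     z = o[0]
--     i = 0
--     while i < len(o) - 1 :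
--         z = (m[i] * b) + o[i + 1]
--         m.append(z)
--         i += 1
--     if m[len(m) - 1] == 0:
--         return True
--     else:
--         return False
--
-- def polinomioQuociente(p,b):
--     """Devolve a lista que representa o polinômio quociente da divisão
--        p(x)/(x-b), onde p(x) é o polinômio cujos coeficientes estão na
--        lista p e b é uma raiz de p(x).
--
--        p -- a lista dos coeficientes do polinômio a ser dividido
--        b -- a raiz a ser usada como divisor
--     """
--
--     # Escreva aqui o corpo da função
--     #Este código foi feito baseado no Algorítimo (Teorema) de Briot-Ruffini
--     m = []
--     o = p + []
--     o.reverse()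
--     m.append(o[0])
--     z = o[0]
--     i = 0
--     while i < len(o) - 2 :
--         z = (m[i] * b) + o[i + 1]
--         m.append(z)
--         i += 1
--     m.reverse()
--     return m
--
-- def listaCanonicaDeRaizes(p):
--     """Devolve a lista canônica de raízes inteiras do polinômio
--        representado pela lista p.
--
--        p -- a lista dos coeficientes do polinômios
--     """
--
--     # Escreva aqui o corpo da função
--     i = 0
--     m = []
--     o = p
--     while len (o) > 1:
--         if abs(o[0]) >= i or o[0] == 0 :
--             if polinomioComRaiz(o,-i) == True:
--                 m.append(-i)
--                 o = polinomioQuociente(o,-i)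
--                 i = 0
--             elif polinomioComRaiz(o,i) == True:
--                 m.append(i)
--                 o = polinomioQuociente(o,i)
--                 i = 0
--             else:
--                 i += 1
--         else:
--             return (m)
--     return m
-- ===== SOURCE B (Python) =====
-- def _eval(p, x):
--     """Horner evaluation of the polynomial p (ascending coefficients) at x."""
--     v = 0
--     for a in reversed(p):
--         v = v * x + a
--     return v
--
-- def _divisors(n):
--     """Sorted positive divisors of n >= 1, found in O(sqrt(n)) trial divisions."""
--     ds = set()
--     d = 1
--     while d * d <= n:
--         if n % d == 0:
--             ds.add(d)
--             ds.add(n // d)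
--         d += 1
--     return sorted(ds)
--
-- def _smallest_root(o):
--     """Integer root of o of smallest magnitude (negative preferred), or None.
--        Only divisors of the constant term can be roots, so only those are tried."""
--     c = o[0]
--     if c == 0:
--         return 0
--     for d in _divisors(abs(c)):
--         if _eval(o, -d) == 0:
--             return -d
--         if _eval(o, d) == 0:
--             return d
--     return None
--
-- def _deflate(p, r):
--     """Quotient of p (ascending coefficients) by (x - r), r a root of p."""
--     q = []
--     acc = 0
--     for a in reversed(p[1:]):
--         acc = acc * r + a
--         q.append(acc)
--     q.reverse()
--     return q
--
-- def listaCanonicaDeRaizes(p):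
--     roots = []
--     o = list(p)
--     while len(o) > 1:
--         r = _smallest_root(o)
--         if r is None:
--             break
--         roots.append(r)
--         o = _deflate(o, r)
--     return roots
-- ===== Notes on version B (the rewrite author's own statement) =====
-- stated objective: faster
-- what changed: Instead of scanning every integer magnitude 0,1,2,... up to |constant term| and running a full Briot-Ruffini evaluation at each candidate, B enumerates only the divisors of the current constant term (found by trial division up to sqrt, then sorted), tests them in the same magnitude/sign order (-d before d), and deflates on each hit; a deflation step is a single synthetic-division pass.
import Mathlib
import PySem

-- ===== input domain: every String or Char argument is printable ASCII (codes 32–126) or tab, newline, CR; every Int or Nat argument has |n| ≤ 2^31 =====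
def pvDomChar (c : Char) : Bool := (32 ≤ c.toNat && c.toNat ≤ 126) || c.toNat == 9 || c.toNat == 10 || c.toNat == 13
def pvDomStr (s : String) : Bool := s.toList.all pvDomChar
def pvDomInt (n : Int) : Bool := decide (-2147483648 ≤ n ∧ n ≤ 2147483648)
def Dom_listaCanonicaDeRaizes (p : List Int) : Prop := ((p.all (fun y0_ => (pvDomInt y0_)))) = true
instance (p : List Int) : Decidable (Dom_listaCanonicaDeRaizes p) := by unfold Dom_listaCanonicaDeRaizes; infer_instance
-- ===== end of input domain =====

-- B replaces A's scan of every magnitude 0..|constant| (one full Briot-Ruffini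
-- evaluation per candidate) by testing only the divisors of the current constant
-- term, generated by sqrt-bounded trial division and sorted; objective: faster.

-- ===== PORT A =====
-- The Briot-Ruffini m-list of A's helpers: m[0] = z, m[k+1] = m[k]*b + o[k+1].
def scanMul (z b : Int) : List Int → List Int
  | [] => [z]
  | a :: t => z :: scanMul (z * b + a) b t

def polinomioComRaiz (p : List Int) (b : Int) : Bool :=
  match p.reverse with
  | [] => false          -- Python raises IndexError here; unreachable from listaCanonicaDeRaizes
  | h :: t => (scanMul h b t).getLast? == some 0

def polinomioQuociente (p : List Int) (b : Int) : List Int :=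
  match p.reverse with
  | [] => []             -- Python raises IndexError here; unreachable from listaCanonicaDeRaizes
  | h :: t => (scanMul h b t.dropLast).reverse

-- termination helpers for the port of A's while-loop (cited in decreasing_by)
theorem scanMul_length (z b : Int) (l : List Int) : (scanMul z b l).length = l.length + 1 := by
  induction l generalizing z with
  | nil => rfl
  | cons a t ih => simp [scanMul, ih]

theorem quociente_length (p : List Int) (b : Int) (h : 1 < p.length) :
    (polinomioQuociente p b).length = p.length - 1 := by
  unfold polinomioQuociente
  rcases hrev : p.reverse with _ | ⟨hh, t⟩
  · have hp : p = [] := by simpa using congrArg List.reverse hrev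
    subst hp; simp at h
  · have hl := congrArg List.length hrev
    simp at hl
    simp [scanMul_length]
    omega

theorem foldl_zero_getLast (t : List Int) (h : Int) :
    (h :: t).getLast? = some (t.foldl (fun z a => z * 0 + a) h) := by
  induction t generalizing h with
  | nil => rfl
  | cons a t ih => simpa using ih a

theorem scanMul_getLast? (l : List Int) (z b : Int) :
    (scanMul z b l).getLast? = some (l.foldl (fun z a => z * b + a) z) := by
  induction l generalizing z with
  | nil => rfl
  | cons a t ih => simp [scanMul, List.getLast?_cons, ih]

theorem comRaiz_zero_true (p : List Int) (hp : p ≠ []) (h0 : p.headI = 0) :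
    polinomioComRaiz p 0 = true := by
  unfold polinomioComRaiz
  rcases hrev : p.reverse with _ | ⟨hh, t⟩
  · exact absurd (by simpa using congrArg List.reverse hrev) hp
  · show ((scanMul hh 0 t).getLast? == some 0) = true
    rw [scanMul_getLast?]
    have hlast : (hh :: t).getLast? = some p.headI := by
      rw [← hrev, List.getLast?_reverse]
      rcases p with _ | ⟨a, r⟩
      · exact absurd rfl hp
      · rfl
    rw [foldl_zero_getLast] at hlast
    simp at hlast
    simp [hlast, h0]

-- the Python while-loop of listaCanonicaDeRaizes, state (o, m, i);
-- the proof argument records that i was reset to 0 whenever o changed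
-- (which Python guarantees), giving termination.
def loopA (o m : List Int) (i : Nat) (hi : o.headI = 0 → i = 0) : List Int :=
  if h1 : 1 < o.length then
    if h2 : o.headI.natAbs ≥ i ∨ o.headI = 0 then
      if hneg : polinomioComRaiz o (-(i : Int)) = true then
        loopA (polinomioQuociente o (-(i : Int))) (m ++ [-(i : Int)]) 0 (fun _ => rfl)
      else if polinomioComRaiz o ((i : Int)) = true then
        loopA (polinomioQuociente o ((i : Int))) (m ++ [(i : Int)]) 0 (fun _ => rfl)
      else
        loopA o m (i + 1) (fun hz => absurd (by
          have h0 : i = 0 := hi hz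
          have hne : o ≠ [] := by intro e; rw [e] at h1; simp at h1
          have := comRaiz_zero_true o hne hz
          rw [h0]; simpa using this) hneg)
    else m
  else m
termination_by (o.length, o.headI.natAbs + 1 - i)
decreasing_by
  · have := quociente_length o (-(i : Int)) h1
    exact Prod.Lex.left _ _ (by omega)
  · have := quociente_length o ((i : Int)) h1
    exact Prod.Lex.left _ _ (by omega)
  · apply Prod.Lex.right
    rcases h2 with h2 | h2
    · omega
    · have := hi h2; omega

def listaCanonicaDeRaizes (p : List Int) : List Int := loopA p [] 0 (fun _ => rfl)

-- ===== PORT B =====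
-- _eval: Horner evaluation, v = 0; for a in reversed(p): v = v*x + a
def bEval (p : List Int) (x : Int) : Int :=
  p.reverse.foldl (fun v a => v * x + a) 0

-- the while-loop of _divisors: d*d <= n trial division collecting d and n//d into a set
def bDivAux (n d : Int) (s : PySem.Set Int) : PySem.Set Int :=
  if h : d * d ≤ n then
    bDivAux n (d + 1)
      (if PySem.Int.mod n d = 0 then
        PySem.Set.add (PySem.Set.add s d) (PySem.Int.floordiv n d)
      else s)
  else s
termination_by (n + 1 - d).toNat
decreasing_by
  have hd : d ≤ n := by
    rcases le_total d 0 with hd0 | hd0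
    · nlinarith
    · nlinarith
  omega

-- _divisors: return sorted(ds)
def bDivisors (n : Int) : List Int :=
  PySem.List.sorted (bDivAux n 1 PySem.Set.empty) (fun x => x) false

-- the for-loop of _smallest_root over the sorted divisor list
def bSmallestAux (o : List Int) : List Int → Option Int
  | [] => none
  | d :: ds =>
    if bEval o (-d) = 0 then some (-d)
    else if bEval o d = 0 then some d
    else bSmallestAux o ds

-- _smallest_root (abs(c) ported as the natAbs cast, exact for Python abs on int)
def bSmallest (o : List Int) : Option Int :=
  if o.headI = 0 then some 0
  else bSmallestAux o (bDivisors (o.headI.natAbs : Int))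

-- the for-loop of _deflate: acc = acc*r + a over reversed(p[1:]), collecting acc
def bloop (acc r : Int) : List Int → List Int
  | [] => []
  | a :: t => (acc * r + a) :: bloop (acc * r + a) r t

def bDeflate (p : List Int) (r : Int) : List Int :=
  (bloop 0 r (p.drop 1).reverse).reverse

-- termination helper for B's main loop (cited in decreasing_by)
theorem bloop_length (acc r : Int) (l : List Int) : (bloop acc r l).length = l.length := by
  induction l generalizing acc with
  | nil => rfl
  | cons a t ih => simp [bloop, ih]

-- the while-loop of listaCanonicaDeRaizes (B): find smallest root, deflate, repeat
def bLoop (o : List Int) : List Int :=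
  if h : 1 < o.length then
    match bSmallest o with
    | none => []
    | some r => r :: bLoop (bDeflate o r)
  else []
termination_by o.length
decreasing_by
  simp [bDeflate, bloop_length]; omega

def listaCanonicaDeRaizes_alt (p : List Int) : List Int := bLoop p

-- ===== PRECONDITION & SPEC =====
def Spec_listaCanonicaDeRaizes (p : List Int) (out : List Int) : Prop := out = listaCanonicaDeRaizes_alt p
instance (p : List Int) (out : List Int) : Decidable (Spec_listaCanonicaDeRaizes p out) := by unfold Spec_listaCanonicaDeRaizes; infer_instance

-- ===== CLAIM (what is proved, stated in full; the proofs are below) =====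
def Claim_equal_listaCanonicaDeRaizes : Prop := ∀ (p : List Int), Dom_listaCanonicaDeRaizes p → Spec_listaCanonicaDeRaizes p (listaCanonicaDeRaizes p)

-- ===== LEMMAS AND PROOFS =====

theorem bEval_eq_foldr (p : List Int) (x : Int) :
    bEval p x = p.foldr (fun a v => v * x + a) 0 := by
  simp [bEval, List.foldl_reverse]

theorem bEval_cons (a : Int) (t : List Int) (x : Int) :
    bEval (a :: t) x = (bEval t x) * x + a := by
  simp [bEval_eq_foldr]

theorem dvd_of_bEval_eq_zero (c : Int) (t : List Int) (x : Int)
    (h : bEval (c :: t) x = 0) : x ∣ c := by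
  refine ⟨-(bEval t x), ?_⟩
  rw [bEval_cons] at h
  linarith

theorem comRaiz_eq (p : List Int) (b : Int) (hp : p ≠ []) :
    polinomioComRaiz p b = decide (bEval p b = 0) := by
  unfold polinomioComRaiz
  rcases hrev : p.reverse with _ | ⟨h, t⟩
  · exact absurd (by simpa using congrArg List.reverse hrev) hp
  · show ((scanMul h b t).getLast? == some 0) = _
    rw [scanMul_getLast?]
    have hb : bEval p b = t.foldl (fun z a => z * b + a) h := by
      simp [bEval, hrev]
    rw [hb]
    by_cases hz : List.foldl (fun z a => z * b + a) h t = 0 <;> simp [hz]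

theorem scanMul_eq_cons_bloop (l : List Int) (z b : Int) :
    scanMul z b l = z :: bloop z b l := by
  induction l generalizing z with
  | nil => rfl
  | cons a t ih => simp [scanMul, bloop, ih]

theorem deflate_eq (p : List Int) (b : Int) (hp : 1 < p.length) :
    polinomioQuociente p b = bDeflate p b := by
  rcases p with _ | ⟨a, rest⟩
  · simp at hp
  · rcases hr : rest.reverse with _ | ⟨h', t'⟩
    · have : rest = [] := by simpa using congrArg List.reverse hr
      subst this; simp at hp
    · have hrev : (a :: rest).reverse = h' :: (t' ++ [a]) := by
        simp [List.reverse_cons, hr]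
      unfold polinomioQuociente bDeflate
      rw [hrev]
      simp only [List.drop_one, List.tail_cons, hr, bloop, List.dropLast_concat]
      rw [scanMul_eq_cons_bloop]
      norm_num

-- divisor-set lemmas
theorem mem_bDivAux_of_mem (n : Int) (x : Int) (d : Int) (s : PySem.Set Int)
    (hx : x ∈ s) : x ∈ bDivAux n d s := by
  rw [bDivAux]
  split
  · rename_i hdd
    apply mem_bDivAux_of_mem
    split
    · simp only [PySem.Set.mem_add]
      exact Or.inl (Or.inl hx)
    · exact hx
  · exact hx
termination_by (n + 1 - d).toNat
decreasing_by
  have hd : d ≤ n := by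
    rcases le_total d 0 with hd0 | hd0
    · nlinarith
    · nlinarith
  omega

theorem bDivAux_sound (n : Int) (x : Int) (d : Int) (s : PySem.Set Int)
    (hd : 1 ≤ d) (hs : ∀ y ∈ s, y ∣ n ∧ 1 ≤ y) (hx : x ∈ bDivAux n d s) :
    x ∣ n ∧ 1 ≤ x := by
  rw [bDivAux] at hx
  by_cases h : d * d ≤ n
  · rw [dif_pos h] at hx
    refine bDivAux_sound n x (d + 1) _ (by omega) ?_ hx
    by_cases hm : PySem.Int.mod n d = 0
    · rw [if_pos hm]
      have hdvd : d ∣ n := (PySem.Int.mod_eq_zero_iff_dvd n d).mp hm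
      intro y hy
      simp only [PySem.Set.mem_add] at hy
      rcases hy with (hy | rfl) | rfl
      · exact hs y hy
      · exact ⟨hdvd, hd⟩
      · obtain ⟨k, rfl⟩ := hdvd
        rw [PySem.Int.floordiv_eq_ediv_of_pos (by omega)]
        rw [Int.mul_ediv_cancel_left _ (by omega : d ≠ 0)]
        exact ⟨Dvd.intro_left d rfl, by nlinarith⟩
    · rw [if_neg hm]; exact hs
  · rw [dif_neg h] at hx
    exact hs x hx
termination_by (n + 1 - d).toNat
decreasing_by
  have hd2 : d ≤ n := by
    rcases le_total d 0 with hd0 | hd0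
    · nlinarith
    · nlinarith
  omega

theorem bDivAux_complete (n x y : Int) (hxy : x * y = n) (h1x : 1 ≤ x) (h1y : 1 ≤ y)
    (d : Int) (s : PySem.Set Int) (hd : 1 ≤ d)
    (hcase : (d ≤ x ∧ x * x ≤ n) ∨ (d ≤ y ∧ y * y ≤ n)) : x ∈ bDivAux n d s := by
  rw [bDivAux]
  by_cases h : d * d ≤ n
  · rw [dif_pos h]
    by_cases hdx : d = x
    · apply mem_bDivAux_of_mem
      have hdvd : d ∣ n := ⟨y, by rw [hdx, hxy]⟩
      rw [if_pos ((PySem.Int.mod_eq_zero_iff_dvd n d).mpr hdvd)]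
      simp only [PySem.Set.mem_add]
      exact Or.inl (Or.inr hdx.symm)
    · by_cases hdy : d = y
      · apply mem_bDivAux_of_mem
        have hdvd : d ∣ n := ⟨x, by rw [hdy, ← hxy, mul_comm]⟩
        rw [if_pos ((PySem.Int.mod_eq_zero_iff_dvd n d).mpr hdvd)]
        have hfd : PySem.Int.floordiv n d = x := by
          rw [PySem.Int.floordiv_eq_ediv_of_pos (by omega), hdy, ← hxy, mul_comm]
          exact Int.mul_ediv_cancel_left _ (by omega)
        simp only [PySem.Set.mem_add, hfd]
        simp
      · refine bDivAux_complete n x y hxy h1x h1y (d + 1) _ (by omega) ?_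
        rcases hcase with ⟨hdx', hxx⟩ | ⟨hdy', hyy⟩
        · exact Or.inl ⟨by omega, hxx⟩
        · exact Or.inr ⟨by omega, hyy⟩
  · rw [dif_neg h]
    exfalso
    rcases hcase with ⟨hdx, hxx⟩ | ⟨hdy, hyy⟩ <;> nlinarith
termination_by (n + 1 - d).toNat
decreasing_by
  have hd2 : d ≤ n := by
    rcases le_total d 0 with hd0 | hd0
    · nlinarith
    · nlinarith
  omega

theorem nodup_bDivAux (n : Int) (d : Int) (s : PySem.Set Int) (hs : s.Nodup) :
    (bDivAux n d s).Nodup := by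
  rw [bDivAux]
  split
  · apply nodup_bDivAux
    split
    · exact PySem.Set.nodup_add _ _ (PySem.Set.nodup_add _ _ hs)
    · exact hs
  · exact hs
termination_by (n + 1 - d).toNat
decreasing_by
  rename_i hdd
  have hd2 : d ≤ n := by
    rcases le_total d 0 with hd0 | hd0
    · nlinarith
    · nlinarith
  omega

theorem mem_bDivisors (n : Int) (hn : 1 ≤ n) (x : Int) :
    x ∈ bDivisors n ↔ x ∣ n ∧ 1 ≤ x := by
  unfold bDivisors
  rw [PySem.List.mem_sorted]
  constructor
  · intro hx
    exact bDivAux_sound n x 1 _ le_rfl (by intro y hy; simp [PySem.Set.empty] at hy) hx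
  · rintro ⟨⟨y, hy⟩, h1x⟩
    have h1y : 1 ≤ y := by nlinarith
    by_cases hxx : x * x ≤ n
    · exact bDivAux_complete n x y hy.symm h1x h1y 1 _ le_rfl (Or.inl ⟨h1x, hxx⟩)
    · have hyx : y ≤ x := by nlinarith
      exact bDivAux_complete n x y hy.symm h1x h1y 1 _ le_rfl (Or.inr ⟨h1y, by nlinarith⟩)

theorem bDivisors_pairwise_lt (n : Int) : (bDivisors n).Pairwise (· < ·) := by
  unfold bDivisors
  have hle := PySem.List.sorted_pairwise (xs := bDivAux n 1 PySem.Set.empty)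
    (key := fun x => x)
  have hperm := PySem.List.sorted_perm (xs := bDivAux n 1 PySem.Set.empty)
    (key := fun x => x) (rev := false)
  have hnd : (bDivAux n 1 PySem.Set.empty).Nodup :=
    nodup_bDivAux n 1 _ (by simp [PySem.Set.empty])
  have hnd2 : (PySem.List.sorted (bDivAux n 1 PySem.Set.empty) (fun x => x) false).Nodup :=
    hperm.nodup_iff.mpr hnd
  exact (List.Pairwise.and hnd2 hle).imp fun h => lt_of_le_of_ne h.2 h.1

-- filter lemmas on strictly increasing lists
theorem filter_ge_of_not_mem (L : List Int) (i : Int) (h : i ∉ L) :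
    L.filter (fun d => i ≤ d) = L.filter (fun d => i + 1 ≤ d) := by
  apply List.filter_congr
  intro x hx
  have hne : x ≠ i := fun e => h (e ▸ hx)
  simp only [decide_eq_decide]
  omega

theorem filter_ge_cons (L : List Int) (i : Int) (hp : L.Pairwise (· < ·)) (h : i ∈ L) :
    L.filter (fun d => i ≤ d) = i :: L.filter (fun d => i + 1 ≤ d) := by
  induction L with
  | nil => simp at h
  | cons b L ih =>
    rcases List.pairwise_cons.mp hp with ⟨hb, hp'⟩
    by_cases hib : i = b
    · subst hib
      rw [List.filter_cons_of_pos (by simp), List.filter_cons_of_neg (by simp)]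
      congr 1
      apply List.filter_congr
      intro x hx
      have := hb x hx
      simp only [decide_eq_decide]
      omega
    · have hmem : i ∈ L := by
        rcases List.mem_cons.mp h with h' | h'
        · exact absurd h' hib
        · exact h'
      have hbi : b < i := hb i hmem
      rw [List.filter_cons_of_neg (by simp; omega), List.filter_cons_of_neg (by simp; omega)]
      exact ih hp' hmem

-- proof-side reformulation of A's candidate scan for a nonzero constant term
def searchA (o : List Int) (i : Nat) : Option Int :=
  if i ≤ o.headI.natAbs then
    if polinomioComRaiz o (-(i : Int)) = true then some (-(i : Int))
    else if polinomioComRaiz o ((i : Int)) = true then some ((i : Int))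
    else searchA o (i + 1)
  else none
termination_by o.headI.natAbs + 1 - i

theorem searchA_eq_aux (o : List Int) (ho : o ≠ []) (hc : o.headI ≠ 0) (i : Nat) :
    searchA o i = bSmallestAux o ((bDivisors (o.headI.natAbs : Int)).filter (fun d => (i : Int) ≤ d)) := by
  have hn1 : 1 ≤ ((o.headI.natAbs : Nat) : Int) := by
    have : 0 < o.headI.natAbs := Int.natAbs_pos.mpr hc
    omega
  have hcast : (((i + 1 : Nat)) : Int) = (i : Int) + 1 := by push_cast; ring
  rw [searchA]
  by_cases hle : i ≤ o.headI.natAbs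
  · rw [if_pos hle]
    by_cases hm : ((i : Int)) ∈ bDivisors ((o.headI.natAbs : Int))
    · rw [filter_ge_cons _ _ (bDivisors_pairwise_lt _) hm]
      show _ = bSmallestAux o ((i : Int) :: _)
      rw [comRaiz_eq o _ ho, comRaiz_eq o _ ho]
      simp only [bSmallestAux]
      by_cases h1 : bEval o (-(i : Int)) = 0
      · simp [h1]
      · by_cases h2 : bEval o ((i : Int)) = 0
        · simp [h1, h2]
        · simp only [h1, h2, decide_false, if_false, Bool.false_eq_true]
          rw [searchA_eq_aux o ho hc (i + 1), hcast]
    · have hroot : ∀ x : Int, bEval o x = 0 → x ∣ o.headI := by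
        intro x hx
        rcases o with _ | ⟨c, t⟩
        · exact absurd rfl ho
        · exact dvd_of_bEval_eq_zero c t x hx
      have hi1 : ∀ x : Int, bEval o x = 0 → x = (i : Int) ∨ x = -(i : Int) → False := by
        intro x hx hxi
        have hdvd : ((i : Int)) ∣ o.headI := by
          rcases hxi with rfl | rfl
          · exact hroot _ hx
          · exact (Int.neg_dvd).mp (hroot _ hx)
        have hizero : i ≠ 0 := by
          intro h0
          subst h0
          simp at hdvd
          exact hc hdvd
        exact hm ((mem_bDivisors _ hn1 _).mpr
          ⟨(Int.dvd_natAbs).mpr hdvd, by omega⟩)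
      have t1 : polinomioComRaiz o (-(i : Int)) = false := by
        rw [comRaiz_eq o _ ho]
        simp only [decide_eq_false_iff_not]
        intro hx
        exact hi1 _ hx (Or.inr rfl)
      have t2 : polinomioComRaiz o ((i : Int)) = false := by
        rw [comRaiz_eq o _ ho]
        simp only [decide_eq_false_iff_not]
        intro hx
        exact hi1 _ hx (Or.inl rfl)
      rw [t1, t2]
      simp only [Bool.false_eq_true, if_false]
      rw [filter_ge_of_not_mem _ _ hm]
      rw [searchA_eq_aux o ho hc (i + 1), hcast]
  · rw [if_neg hle]
    have hemp : (bDivisors ((o.headI.natAbs : Int))).filter (fun d => (i : Int) ≤ d) = [] := by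
      rw [List.filter_eq_nil_iff]
      intro x hx
      obtain ⟨hdvd, h1x⟩ := (mem_bDivisors _ hn1 x).mp hx
      have hxn : x ≤ ((o.headI.natAbs : Nat) : Int) := Int.le_of_dvd (by omega) hdvd
      simp only [decide_eq_true_eq]
      omega
    rw [hemp]
    rfl
termination_by o.headI.natAbs + 1 - i

theorem loopA_small (o m : List Int) (i : Nat) (hi : o.headI = 0 → i = 0)
    (h1 : ¬ 1 < o.length) : loopA o m i hi = m := by
  rw [loopA, dif_neg h1]

theorem loopA_zero (o m : List Int) (hi : o.headI = 0 → 0 = 0)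
    (h1 : 1 < o.length) (h0 : o.headI = 0) :
    loopA o m 0 hi = loopA (polinomioQuociente o 0) (m ++ [0]) 0 (fun _ => rfl) := by
  have hne : o ≠ [] := by intro e; rw [e] at h1; simp at h1
  have ht : polinomioComRaiz o (-((0 : Nat) : Int)) = true := by
    simpa using comRaiz_zero_true o hne h0
  rw [loopA, dif_pos h1, dif_pos (Or.inl (Nat.zero_le _)), dif_pos ht]
  norm_num

theorem loopA_search (o m : List Int) (i : Nat) (hi : o.headI = 0 → i = 0)
    (h1 : 1 < o.length) (hc : o.headI ≠ 0) :
    loopA o m i hi = match searchA o i with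
      | none => m
      | some r => loopA (polinomioQuociente o r) (m ++ [r]) 0 (fun _ => rfl) := by
  rw [loopA, searchA]
  by_cases hle : i ≤ o.headI.natAbs
  · rw [dif_pos h1, dif_pos (Or.inl hle), if_pos hle]
    by_cases t1 : polinomioComRaiz o (-(i : Int)) = true
    · rw [dif_pos t1, if_pos t1]
    · rw [dif_neg t1, if_neg t1]
      by_cases t2 : polinomioComRaiz o ((i : Int)) = true
      · rw [if_pos t2, if_pos t2]
      · rw [if_neg t2, if_neg t2]
        exact loopA_search o m (i + 1) _ h1 hc
  · rw [dif_pos h1, if_neg hle]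
    have hcond : ¬ (o.headI.natAbs ≥ i ∨ o.headI = 0) := by
      rintro (h | h)
      · omega
      · exact hc h
    rw [dif_neg hcond]
termination_by o.headI.natAbs + 1 - i

theorem loopA_eq_bLoop (o m : List Int) (hi : o.headI = 0 → 0 = 0) :
    loopA o m 0 hi = m ++ bLoop o := by
  by_cases h1 : 1 < o.length
  · have ho : o ≠ [] := by intro e; rw [e] at h1; simp at h1
    by_cases h0 : o.headI = 0
    · rw [loopA_zero o m hi h1 h0]
      rw [loopA_eq_bLoop (polinomioQuociente o 0) (m ++ [0]) (fun _ => rfl)]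
      rw [deflate_eq o 0 h1]
      conv_rhs => rw [bLoop]
      simp [bSmallest, h0, h1]
    · rw [loopA_search o m 0 hi h1 h0]
      have hn1 : 1 ≤ ((o.headI.natAbs : Nat) : Int) := by
        have : 0 < o.headI.natAbs := Int.natAbs_pos.mpr h0
        omega
      have hs : searchA o 0 = bSmallest o := by
        rw [searchA_eq_aux o ho h0 0]
        have hf : (bDivisors ((o.headI.natAbs : Int))).filter
            (fun d => ((0 : Nat) : Int) ≤ d) = bDivisors ((o.headI.natAbs : Int)) := by
          rw [List.filter_eq_self]
          intro x hx
          obtain ⟨_, h1x⟩ := (mem_bDivisors _ hn1 x).mp hx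
          simp only [decide_eq_true_eq]
          omega
        rw [hf]
        simp [bSmallest, h0]
      rw [hs, bLoop, dif_pos h1]
      rcases hb : bSmallest o with _ | r
      · simp
      · show loopA (polinomioQuociente o r) (m ++ [r]) 0 _ = m ++ (r :: bLoop (bDeflate o r))
        rw [loopA_eq_bLoop (polinomioQuociente o r) (m ++ [r]) (fun _ => rfl)]
        rw [deflate_eq o r h1]
        simp
  · rw [loopA_small o m 0 hi h1, bLoop, dif_neg h1]
    simp
termination_by o.length
decreasing_by
  all_goals first
    | (have hq := quociente_length o r h1; omega)
    | (have hq := quociente_length o 0 h1; omega)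

-- ===== VERDICT (by name: the statement is the Claim_ definition above) =====
theorem listaCanonicaDeRaizes_spec : Claim_equal_listaCanonicaDeRaizes := by
  intro p _
  unfold Spec_listaCanonicaDeRaizes listaCanonicaDeRaizes listaCanonicaDeRaizes_alt
  simpa using loopA_eq_bLoop p [] (fun _ => rfl)
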